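-- pv_equiv track=rewrite | github.com/eshroom888/dawo.eco | teams/dawo/research/scoring/components/relevance.py | _find_matched_keywords
-- ===== SOURCE A (Python) =====
-- def _find_matched_keywords(text: str, keywords: list[str]) -> list[str]:
--     """Find which keywords matched in text.
--
--     Args:
--         text: Lowercase text to search.
--         keywords: List of lowercase keywords.
--
--     Returns:
--         List of matched keywords (deduplicated by concept).
--     """
--     matched: list[str] = []
--     seen_concepts: set[str] = set()
--
--     for keyword in keywords:
--         if keyword in text:
--             concept = keyword.split()[0]
--             if concept not in seen_concepts:
--                 matched.append(keyword)
--                 seen_concepts.add(concept)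
--
--     return matched
-- ===== SOURCE B (Python) =====
-- def _find_matched_keywords(text: str, keywords: list[str]) -> list[str]:
--     """Find which keywords matched in text, deduplicated by first-word concept."""
--     remaining = [(kw, kw.split()[0]) for kw in keywords if kw in text]
--     result: list[str] = []
--     while remaining:
--         head, concept = remaining[0]
--         result.append(head)
--         remaining = [p for p in remaining[1:] if p[1] != concept]
--     return result
-- ===== Notes on version B (the rewrite author's own statement) =====
-- stated objective: alternative
-- what changed: replaces the single pass with a matched-list plus seen-concepts-set by two stages without any set/dict state: first filter the keywords occurring in text (pairing each with its first-word concept), then a worklist elimination loop that repeatedly takes the head and filters out every later keyword sharing its concept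
import Mathlib
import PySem

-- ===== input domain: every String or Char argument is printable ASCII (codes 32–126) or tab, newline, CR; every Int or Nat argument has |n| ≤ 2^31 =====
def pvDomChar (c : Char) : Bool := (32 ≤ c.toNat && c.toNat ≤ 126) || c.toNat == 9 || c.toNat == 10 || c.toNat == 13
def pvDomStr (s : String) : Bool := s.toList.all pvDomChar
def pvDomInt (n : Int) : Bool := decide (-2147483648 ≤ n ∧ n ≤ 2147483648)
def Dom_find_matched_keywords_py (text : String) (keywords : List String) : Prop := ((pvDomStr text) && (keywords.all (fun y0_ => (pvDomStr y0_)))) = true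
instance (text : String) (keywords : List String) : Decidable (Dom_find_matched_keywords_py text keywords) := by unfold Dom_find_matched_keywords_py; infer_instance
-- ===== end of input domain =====

-- B restructures A's single pass with a matched-list + seen-concepts-set into two stages with
-- no set/dict state: filter the keywords occurring in text, then a worklist elimination loop
-- that takes the head and filters out later keywords with its first-word concept; objective: alternative.


-- ===== PORT A =====
-- loop body of A: 'if keyword in text: concept = keyword.split()[0]; if concept not in seen: …'
-- (split()[0] on an empty split is Python's IndexError — those inputs are excluded by Pre_;
-- the port returns the state unchanged there)
def pvStepA (text : String) (st : List String × PySem.Set String) (kw : String) :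
    List String × PySem.Set String :=
  if PySem.Str.isIn kw text then
    match PySem.Str.split₀ kw with
    | [] => st
    | concept :: _ =>
      if PySem.Set.contains st.2 concept then st
      else (st.1 ++ [kw], PySem.Set.add st.2 concept)
  else st

def find_matched_keywords_py (text : String) (keywords : List String) : List String :=
  (keywords.foldl (pvStepA text) ([], PySem.Set.empty)).1

-- ===== PORT B =====
-- 'keyword.split()[0]' — on split() == [] Python raises IndexError (excluded by Pre_);
-- the port returns "" there
def pvConcept (kw : String) : String := (PySem.Str.split₀ kw).headD ""

-- B's 'while remaining:' worklist loop over (keyword, concept) pairs: append the head keyword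
-- to result, keep of the rest only the pairs whose concept differs from the head's
def pvLoopB (result : List String) : List (String × String) → List String
  | [] => result
  | (head, concept) :: rest =>
    pvLoopB (result ++ [head]) (rest.filter (fun p => p.2 != concept))
termination_by remaining => remaining.length
decreasing_by
  simp only [List.length_unattach]
  exact Nat.lt_succ_of_le ((List.length_filter_le _ _).trans (by simp))

def find_matched_keywords_py_alt (text : String) (keywords : List String) : List String :=
  pvLoopB []
    ((keywords.filter (fun kw => PySem.Str.isIn kw text)).map (fun kw => (kw, pvConcept kw)))

-- ===== PRECONDITION & SPEC =====
-- Pre_ excludes exactly the inputs where A (and B) raise IndexError: a keyword that occurs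
-- in text but consists only of whitespace (keyword.split() == []).
def Pre_find_matched_keywords_py (text : String) (keywords : List String) : Prop :=
  ∀ kw ∈ keywords, PySem.Str.isIn kw text = true → PySem.Str.split₀ kw ≠ []
instance (text : String) (keywords : List String) : Decidable (Pre_find_matched_keywords_py text keywords) := by unfold Pre_find_matched_keywords_py; infer_instance

def pvWitness_find_matched_keywords_py : String × List String :=
  ("hello world", ["hello there", "hello", "world", "x y"])

def Spec_find_matched_keywords_py (text : String) (keywords : List String) (out : List String) : Prop := out = find_matched_keywords_py_alt text keywords
instance (text : String) (keywords : List String) (out : List String) : Decidable (Spec_find_matched_keywords_py text keywords out) := by unfold Spec_find_matched_keywords_py; infer_instance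

-- ===== CLAIM (what is proved, stated in full; the proofs are below) =====
def Claim_equal_find_matched_keywords_py : Prop := ∀ (text : String) (keywords : List String), Dom_find_matched_keywords_py text keywords → Pre_find_matched_keywords_py text keywords → Spec_find_matched_keywords_py text keywords (find_matched_keywords_py text keywords)

-- ===== LEMMAS AND PROOFS =====

-- A's fold ignores keywords not occurring in text, so it equals the fold over B's first stage.
lemma pvFoldA_filter (text : String) :
    ∀ (ks : List String) (st : List String × PySem.Set String),
      ks.foldl (pvStepA text) st
        = (ks.filter (fun kw => PySem.Str.isIn kw text)).foldl (pvStepA text) st := by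
  intro ks
  induction ks with
  | nil => intro st; rfl
  | cons kw rest ih =>
    intro st
    cases hh : PySem.Str.isIn kw text with
    | true =>
      have h2 : PySem.Chars.isIn kw.toList text.toList = true := by simpa using hh
      simp [h2, ih]
    | false =>
      have h2 : PySem.Chars.isIn kw.toList text.toList = false := by simpa using hh
      have hid : pvStepA text st kw = st := by simp [pvStepA, h2]
      simp [h2, hid, ih]

-- Loop invariant: on a list of matching keywords, A's matched-list is B's worklist loop
-- started from the same accumulator on the keywords whose concept is not yet seen.
lemma pvLoop_eq (text : String) :
    ∀ (hs : List String) (acc : List String) (seen : PySem.Set String),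
      (∀ kw ∈ hs, PySem.Str.isIn kw text = true ∧ PySem.Str.split₀ kw ≠ []) →
      (hs.foldl (pvStepA text) (acc, seen)).1
        = pvLoopB acc ((hs.filter (fun k => !(PySem.Set.contains seen (pvConcept k)))).map
            (fun kw => (kw, pvConcept kw))) := by
  intro hs
  induction hs with
  | nil => intro acc seen _; simp [pvLoopB]
  | cons h t ih =>
    intro acc seen hpre
    obtain ⟨hin, hne⟩ := hpre h (List.mem_cons_self)
    have hin' : PySem.Chars.isIn h.toList text.toList = true := by simpa using hin
    have htail : ∀ kw ∈ t, PySem.Str.isIn kw text = true ∧ PySem.Str.split₀ kw ≠ [] := by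
      intro kw hk; exact hpre kw (List.mem_cons_of_mem _ hk)
    cases hsp : PySem.Str.split₀ h with
    | nil => exact absurd hsp hne
    | cons c ts =>
      have hc : pvConcept h = c := by simp [pvConcept, hsp]
      by_cases hseen : c ∈ seen
      · -- concept already seen: A skips h, B's filter drops h
        have hct : PySem.Set.contains seen c = true := (PySem.Set.contains_iff seen c).mpr hseen
        have hA : pvStepA text (acc, seen) h = (acc, seen) := by
          simp [pvStepA, hin', hsp, hseen]
        simp only [List.foldl_cons, hA, List.filter_cons, hc, hct,
          Bool.not_true, Bool.false_eq_true, if_false]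
        exact ih acc seen htail
      · have hct : PySem.Set.contains seen c = false := by
          cases hq : PySem.Set.contains seen c with
          | false => rfl
          | true => exact absurd ((PySem.Set.contains_iff seen c).mp hq) hseen
        have hA : pvStepA text (acc, seen) h
            = (acc ++ [h], PySem.Set.add seen c) := by
          simp [pvStepA, hin', hsp, hseen]
        -- after A marks c seen, its remaining filter is B's elimination filter on the rest
        have hfil : t.filter (fun k => !(PySem.Set.contains (PySem.Set.add seen c) (pvConcept k)))
            = (t.filter (fun k => !(PySem.Set.contains seen (pvConcept k)))).filter
                (fun k => pvConcept k != pvConcept h) := by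
          rw [List.filter_filter]
          apply List.filter_congr
          intro k _
          by_cases hkc : pvConcept k = c <;> by_cases hm0 : pvConcept k ∈ seen <;>
            simp [hc, hkc, hm0, PySem.Set.mem_add, PySem.Set.contains_eq_listContains]
        simp only [List.foldl_cons, hA, List.filter_cons, hc, hct,
          Bool.not_false, if_true]
        rw [ih (acc ++ [h]) (PySem.Set.add seen c) htail, hfil]
        simp only [List.map_cons, hc, pvLoopB, List.filter_map]
        congr 2

-- ===== VERDICT (by name: the statement is the Claim_ definition above) =====
theorem find_matched_keywords_py_spec : Claim_equal_find_matched_keywords_py := by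
  intro text keywords _ hpre
  unfold Spec_find_matched_keywords_py find_matched_keywords_py find_matched_keywords_py_alt
  rw [pvFoldA_filter text keywords]
  have hall : ∀ kw ∈ keywords.filter (fun kw => PySem.Str.isIn kw text),
      PySem.Str.isIn kw text = true ∧ PySem.Str.split₀ kw ≠ [] := by
    intro kw hk
    have hm := List.mem_filter.mp hk
    exact ⟨hm.2, hpre kw hm.1 hm.2⟩
  rw [pvLoop_eq text _ [] PySem.Set.empty hall]
  have hid : (keywords.filter (fun kw => PySem.Str.isIn kw text)).filter
      (fun k => !(PySem.Set.contains PySem.Set.empty (pvConcept k)))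
      = keywords.filter (fun kw => PySem.Str.isIn kw text) := by
    apply List.filter_eq_self.mpr
    intro k _
    simp [PySem.Set.contains, PySem.Set.empty]
  rw [hid]
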